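-- pv_equiv track=rewrite | github.com/Shukry7/AI-Driven-Legal-system | backend/app/services/classifier.py | _generate_key_factors
-- ===== SOURCE A (Python) =====
-- from typing import List, Dict, Tuple
--
-- def _generate_key_factors(clause: str, risk_level: str) -> List[str]:
--     """
--     Generate key risk factors for a clause (simplified version).
--     In production, this could use additional ML models or rule-based analysis.
--
--     Args:
--         clause: The clause text
--         risk_level: The predicted risk level
--
--     Returns:
--         List of key factor strings
--     """
--     factors = []
--     clause_lower = clause.lower()
--
--     # High risk indicators
--     if risk_level == "High":
--         if any(word in clause_lower for word in ["breach", "failed", "violation"]):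
--             factors.append("Contains breach/failure language")
--         if any(word in clause_lower for word in ["damages", "penalty", "liable"]):
--             factors.append("Financial liability indicated")
--         if any(word in clause_lower for word in ["court", "judgment", "ordered"]):
--             factors.append("Judicial determination present")
--         if not factors:
--             factors.append("High legal risk identified")
--
--     # Medium risk indicators
--     elif risk_level == "Medium":
--         if any(word in clause_lower for word in ["claim", "dispute", "alleged"]):
--             factors.append("Disputed matter")
--         if any(word in clause_lower for word in ["may", "could", "potential"]):
--             factors.append("Conditional outcome")
--         if not factors:
--             factors.append("Moderate legal implications")
--
--     # Low risk indicators
--     else: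
--         if any(word in clause_lower for word in ["procedural", "evidence", "consideration"]):
--             factors.append("Procedural statement")
--         if any(word in clause_lower for word in ["not", "without", "no"]):
--             factors.append("Negative/mitigating language")
--         if not factors:
--             factors.append("Low legal risk")
--
--     return factors if factors else ["Standard legal clause"]
-- ===== SOURCE B (Python) =====
-- from typing import List, Dict, Tuple
--
-- def _generate_key_factors(clause: str, risk_level: str) -> List[str]:
--     # Select the rule bucket for the level.
--     if risk_level == "High":
--         rules = [(["breach", "failed", "violation"], "Contains breach/failure language"),
--                  (["damages", "penalty", "liable"], "Financial liability indicated"),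
--                  (["court", "judgment", "ordered"], "Judicial determination present")]
--         default = "High legal risk identified"
--     elif risk_level == "Medium":
--         rules = [(["claim", "dispute", "alleged"], "Disputed matter"),
--                  (["may", "could", "potential"], "Conditional outcome")]
--         default = "Moderate legal implications"
--     else:
--         rules = [(["procedural", "evidence", "consideration"], "Procedural statement"),
--                  (["not", "without", "no"], "Negative/mitigating language")]
--         default = "Low legal risk"
--     # Single left-to-right multi-pattern scan of the clause: at each position,
--     # record every keyword that starts there (instead of one substring search per keyword).
--     text = clause.lower()
--     keywords = [w for words, _ in rules for w in words]
--     found = set()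
--     for i in range(len(text)):
--         for kw in keywords:
--             if text.startswith(kw, i):
--                 found.add(kw)
--     factors = [factor for words, factor in rules
--                if any(w in found for w in words)]
--     return factors if factors else [default]
-- ===== Notes on version B (the rewrite author's own statement) =====
-- stated objective: alternative
-- what changed: Replaces A's per-keyword substring searches (one 'word in clause' scan per keyword) by a single left-to-right multi-pattern scan of the clause that, at each position, records every keyword starting there into a found-set, from which the factors are then derived.
import Mathlib
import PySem

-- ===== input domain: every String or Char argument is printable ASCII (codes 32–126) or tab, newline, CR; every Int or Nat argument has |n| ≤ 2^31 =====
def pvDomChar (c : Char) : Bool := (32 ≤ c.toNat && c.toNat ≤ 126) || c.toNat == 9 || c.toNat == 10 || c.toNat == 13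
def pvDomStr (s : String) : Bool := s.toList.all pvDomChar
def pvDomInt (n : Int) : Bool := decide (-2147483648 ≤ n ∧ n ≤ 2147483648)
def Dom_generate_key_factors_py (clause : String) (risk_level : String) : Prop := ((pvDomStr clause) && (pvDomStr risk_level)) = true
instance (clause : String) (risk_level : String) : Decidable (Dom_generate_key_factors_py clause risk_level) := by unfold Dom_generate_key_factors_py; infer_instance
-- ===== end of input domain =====

-- B replaces A's per-keyword substring searches by one left-to-right multi-pattern scan of the clause collecting a found-set of keywords; same outputs (alternative algorithm, same cost class).

-- ===== PORT A =====
def generate_key_factors_py (clause : String) (risk_level : String) : List String :=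
  let clause_lower := PySem.Str.lower clause
  let factors : List String :=
    if risk_level == "High" then
      let factors : List String := []
      let factors := if ["breach", "failed", "violation"].any (fun w => PySem.Str.isIn w clause_lower) then factors ++ ["Contains breach/failure language"] else factors
      let factors := if ["damages", "penalty", "liable"].any (fun w => PySem.Str.isIn w clause_lower) then factors ++ ["Financial liability indicated"] else factors
      let factors := if ["court", "judgment", "ordered"].any (fun w => PySem.Str.isIn w clause_lower) then factors ++ ["Judicial determination present"] else factors
      if factors.isEmpty then factors ++ ["High legal risk identified"] else factors
    else if risk_level == "Medium" then
      let factors : List String := []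
      let factors := if ["claim", "dispute", "alleged"].any (fun w => PySem.Str.isIn w clause_lower) then factors ++ ["Disputed matter"] else factors
      let factors := if ["may", "could", "potential"].any (fun w => PySem.Str.isIn w clause_lower) then factors ++ ["Conditional outcome"] else factors
      if factors.isEmpty then factors ++ ["Moderate legal implications"] else factors
    else
      let factors : List String := []
      let factors := if ["procedural", "evidence", "consideration"].any (fun w => PySem.Str.isIn w clause_lower) then factors ++ ["Procedural statement"] else factors
      let factors := if ["not", "without", "no"].any (fun w => PySem.Str.isIn w clause_lower) then factors ++ ["Negative/mitigating language"] else factors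
      if factors.isEmpty then factors ++ ["Low legal risk"] else factors
  if factors.isEmpty then ["Standard legal clause"] else factors

-- ===== PORT B =====
-- The scan loop of Source B: walk the character list; at each position add to the found-set
-- every keyword that starts there (Python: text.startswith(kw, i)).
def pvScan (kws : List String) : List Char → PySem.Set String → PySem.Set String
  | [], found => found
  | c :: rest, found =>
      pvScan kws rest
        (kws.foldl (fun acc kw =>
          if PySem.Chars.startswith (c :: rest) kw.toList then PySem.Set.add acc kw else acc) found)

def generate_key_factors_py_alt (clause : String) (risk_level : String) : List String :=
  let bucket : List (List String × String) × String :=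
    if risk_level == "High" then
      ([(["breach", "failed", "violation"], "Contains breach/failure language"),
        (["damages", "penalty", "liable"], "Financial liability indicated"),
        (["court", "judgment", "ordered"], "Judicial determination present")],
       "High legal risk identified")
    else if risk_level == "Medium" then
      ([(["claim", "dispute", "alleged"], "Disputed matter"),
        (["may", "could", "potential"], "Conditional outcome")],
       "Moderate legal implications")
    else
      ([(["procedural", "evidence", "consideration"], "Procedural statement"),
        (["not", "without", "no"], "Negative/mitigating language")],
       "Low legal risk")
  let text := PySem.Str.lower clause
  let keywords := bucket.1.flatMap (fun r => r.1)
  let found := pvScan keywords text.toList PySem.Set.empty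
  let factors := (bucket.1.filter (fun r => r.1.any (fun w => PySem.Set.contains found w))).map (fun r => r.2)
  if factors.isEmpty then [bucket.2] else factors

-- ===== PRECONDITION & SPEC =====
def Spec_generate_key_factors_py (clause : String) (risk_level : String) (out : List String) : Prop := out = generate_key_factors_py_alt clause risk_level
instance (clause : String) (risk_level : String) (out : List String) : Decidable (Spec_generate_key_factors_py clause risk_level out) := by unfold Spec_generate_key_factors_py; infer_instance

-- ===== CLAIM =====
def Claim_equal_generate_key_factors_py : Prop := ∀ (clause : String) (risk_level : String), Dom_generate_key_factors_py clause risk_level → Spec_generate_key_factors_py clause risk_level (generate_key_factors_py clause risk_level)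

-- ===== LEMMAS AND PROOFS =====

lemma mem_foldl_addif (kws : List String) (acc : PySem.Set String) (p : String → Bool) (kw : String) :
    kw ∈ kws.foldl (fun a k => if p k then PySem.Set.add a k else a) acc ↔
      kw ∈ acc ∨ (kw ∈ kws ∧ p kw = true) := by
  induction kws generalizing acc with
  | nil => simp
  | cons k ks ih =>
      by_cases hp : p k = true
      · simp only [List.foldl_cons, hp, if_pos, ih, PySem.Set.mem_add, List.mem_cons]
        constructor
        · rintro ((h | rfl) | h)
          · exact Or.inl h
          · exact Or.inr ⟨Or.inl rfl, hp⟩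
          · exact Or.inr ⟨Or.inr h.1, h.2⟩
        · rintro (h | ⟨(rfl | hmem), hq⟩)
          · exact Or.inl (Or.inl h)
          · exact Or.inl (Or.inr rfl)
          · exact Or.inr ⟨hmem, hq⟩
      · simp only [List.foldl_cons, hp, if_neg, ih, List.mem_cons, Bool.not_eq_true]
        constructor
        · rintro (h | h)
          · exact Or.inl h
          · exact Or.inr ⟨Or.inr h.1, h.2⟩
        · rintro (h | ⟨(rfl | hmem), hq⟩)
          · exact Or.inl h
          · exact absurd hq (by simp [hp])
          · exact Or.inr ⟨hmem, hq⟩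

lemma mem_pvScan (kws : List String) (chars : List Char) (found : PySem.Set String)
    (kw : String) (hne : kw.toList ≠ []) :
    kw ∈ pvScan kws chars found ↔
      kw ∈ found ∨ (kw ∈ kws ∧ PySem.Chars.isIn kw.toList chars = true) := by
  induction chars generalizing found with
  | nil =>
      simp [pvScan, PySem.Chars.isIn_eq_false_iff, hne]
  | cons c rest ih =>
      have hsplit : PySem.Chars.isIn kw.toList (c :: rest) = true ↔
          PySem.Chars.startswith (c :: rest) kw.toList = true ∨ PySem.Chars.isIn kw.toList rest = true := by
        simp [PySem.Chars.isIn_iff_infix, PySem.Chars.startswith_iff, List.infix_cons_iff]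
      rw [pvScan, ih, mem_foldl_addif, hsplit]
      tauto


lemma contains_scan (kws : List String) (chars : List Char) (kw : String)
    (hmem : kw ∈ kws) (hne : kw.toList ≠ []) :
    PySem.Set.contains (pvScan kws chars PySem.Set.empty) kw = PySem.Chars.isIn kw.toList chars := by
  have h := mem_pvScan kws chars PySem.Set.empty kw hne
  simp only [PySem.Set.empty, List.not_mem_nil, false_or] at h
  cases hb : PySem.Chars.isIn kw.toList chars
  · simp [PySem.Set.contains, h, hb]
  · simp [PySem.Set.contains, h, hb, hmem]

-- ===== VERDICT =====
theorem generate_key_factors_py_spec : Claim_equal_generate_key_factors_py := by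
  intro clause risk_level _
  unfold Spec_generate_key_factors_py generate_key_factors_py generate_key_factors_py_alt
  by_cases hHigh : risk_level = "High"
  · subst hHigh
    simp only [beq_self_eq_true, if_pos]
    simp only [List.flatMap_cons, List.flatMap_nil, List.append_nil, List.filter,
      List.any_cons, List.any_nil, List.cons_append, List.nil_append, PySem.Str.isIn_eq, PySem.Str.toList_lower]
    have h0 : PySem.Set.contains (pvScan (["breach", "failed", "violation", "damages", "penalty", "liable", "court", "judgment", "ordered"] : List String) (PySem.Chars.lower clause.toList) PySem.Set.empty) "breach" = PySem.Chars.isIn "breach".toList (PySem.Chars.lower clause.toList) := contains_scan _ _ _ (by decide) (by decide)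
    have h1 : PySem.Set.contains (pvScan (["breach", "failed", "violation", "damages", "penalty", "liable", "court", "judgment", "ordered"] : List String) (PySem.Chars.lower clause.toList) PySem.Set.empty) "failed" = PySem.Chars.isIn "failed".toList (PySem.Chars.lower clause.toList) := contains_scan _ _ _ (by decide) (by decide)
    have h2 : PySem.Set.contains (pvScan (["breach", "failed", "violation", "damages", "penalty", "liable", "court", "judgment", "ordered"] : List String) (PySem.Chars.lower clause.toList) PySem.Set.empty) "violation" = PySem.Chars.isIn "violation".toList (PySem.Chars.lower clause.toList) := contains_scan _ _ _ (by decide) (by decide)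
    have h3 : PySem.Set.contains (pvScan (["breach", "failed", "violation", "damages", "penalty", "liable", "court", "judgment", "ordered"] : List String) (PySem.Chars.lower clause.toList) PySem.Set.empty) "damages" = PySem.Chars.isIn "damages".toList (PySem.Chars.lower clause.toList) := contains_scan _ _ _ (by decide) (by decide)
    have h4 : PySem.Set.contains (pvScan (["breach", "failed", "violation", "damages", "penalty", "liable", "court", "judgment", "ordered"] : List String) (PySem.Chars.lower clause.toList) PySem.Set.empty) "penalty" = PySem.Chars.isIn "penalty".toList (PySem.Chars.lower clause.toList) := contains_scan _ _ _ (by decide) (by decide)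
    have h5 : PySem.Set.contains (pvScan (["breach", "failed", "violation", "damages", "penalty", "liable", "court", "judgment", "ordered"] : List String) (PySem.Chars.lower clause.toList) PySem.Set.empty) "liable" = PySem.Chars.isIn "liable".toList (PySem.Chars.lower clause.toList) := contains_scan _ _ _ (by decide) (by decide)
    have h6 : PySem.Set.contains (pvScan (["breach", "failed", "violation", "damages", "penalty", "liable", "court", "judgment", "ordered"] : List String) (PySem.Chars.lower clause.toList) PySem.Set.empty) "court" = PySem.Chars.isIn "court".toList (PySem.Chars.lower clause.toList) := contains_scan _ _ _ (by decide) (by decide)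
    have h7 : PySem.Set.contains (pvScan (["breach", "failed", "violation", "damages", "penalty", "liable", "court", "judgment", "ordered"] : List String) (PySem.Chars.lower clause.toList) PySem.Set.empty) "judgment" = PySem.Chars.isIn "judgment".toList (PySem.Chars.lower clause.toList) := contains_scan _ _ _ (by decide) (by decide)
    have h8 : PySem.Set.contains (pvScan (["breach", "failed", "violation", "damages", "penalty", "liable", "court", "judgment", "ordered"] : List String) (PySem.Chars.lower clause.toList) PySem.Set.empty) "ordered" = PySem.Chars.isIn "ordered".toList (PySem.Chars.lower clause.toList) := contains_scan _ _ _ (by decide) (by decide)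
    rw [h0, h1, h2, h3, h4, h5, h6, h7, h8]
    generalize (PySem.Chars.isIn "breach".toList (PySem.Chars.lower clause.toList) || (PySem.Chars.isIn "failed".toList (PySem.Chars.lower clause.toList) || (PySem.Chars.isIn "violation".toList (PySem.Chars.lower clause.toList) || false))) = g0
    generalize (PySem.Chars.isIn "damages".toList (PySem.Chars.lower clause.toList) || (PySem.Chars.isIn "penalty".toList (PySem.Chars.lower clause.toList) || (PySem.Chars.isIn "liable".toList (PySem.Chars.lower clause.toList) || false))) = g1
    generalize (PySem.Chars.isIn "court".toList (PySem.Chars.lower clause.toList) || (PySem.Chars.isIn "judgment".toList (PySem.Chars.lower clause.toList) || (PySem.Chars.isIn "ordered".toList (PySem.Chars.lower clause.toList) || false))) = g2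
    cases g0 <;> cases g1 <;> cases g2 <;> simp
  · by_cases hMed : risk_level = "Medium"
    · subst hMed
      have hne : ("Medium" == "High") = false := by decide
      simp only [hne, Bool.false_eq_true, if_false, beq_self_eq_true, if_pos]
      simp only [List.flatMap_cons, List.flatMap_nil, List.append_nil, List.filter,
        List.any_cons, List.any_nil, List.cons_append, List.nil_append, PySem.Str.isIn_eq, PySem.Str.toList_lower]
      have h0 : PySem.Set.contains (pvScan (["claim", "dispute", "alleged", "may", "could", "potential"] : List String) (PySem.Chars.lower clause.toList) PySem.Set.empty) "claim" = PySem.Chars.isIn "claim".toList (PySem.Chars.lower clause.toList) := contains_scan _ _ _ (by decide) (by decide)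
      have h1 : PySem.Set.contains (pvScan (["claim", "dispute", "alleged", "may", "could", "potential"] : List String) (PySem.Chars.lower clause.toList) PySem.Set.empty) "dispute" = PySem.Chars.isIn "dispute".toList (PySem.Chars.lower clause.toList) := contains_scan _ _ _ (by decide) (by decide)
      have h2 : PySem.Set.contains (pvScan (["claim", "dispute", "alleged", "may", "could", "potential"] : List String) (PySem.Chars.lower clause.toList) PySem.Set.empty) "alleged" = PySem.Chars.isIn "alleged".toList (PySem.Chars.lower clause.toList) := contains_scan _ _ _ (by decide) (by decide)
      have h3 : PySem.Set.contains (pvScan (["claim", "dispute", "alleged", "may", "could", "potential"] : List String) (PySem.Chars.lower clause.toList) PySem.Set.empty) "may" = PySem.Chars.isIn "may".toList (PySem.Chars.lower clause.toList) := contains_scan _ _ _ (by decide) (by decide)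
      have h4 : PySem.Set.contains (pvScan (["claim", "dispute", "alleged", "may", "could", "potential"] : List String) (PySem.Chars.lower clause.toList) PySem.Set.empty) "could" = PySem.Chars.isIn "could".toList (PySem.Chars.lower clause.toList) := contains_scan _ _ _ (by decide) (by decide)
      have h5 : PySem.Set.contains (pvScan (["claim", "dispute", "alleged", "may", "could", "potential"] : List String) (PySem.Chars.lower clause.toList) PySem.Set.empty) "potential" = PySem.Chars.isIn "potential".toList (PySem.Chars.lower clause.toList) := contains_scan _ _ _ (by decide) (by decide)
      rw [h0, h1, h2, h3, h4, h5]
      generalize (PySem.Chars.isIn "claim".toList (PySem.Chars.lower clause.toList) || (PySem.Chars.isIn "dispute".toList (PySem.Chars.lower clause.toList) || (PySem.Chars.isIn "alleged".toList (PySem.Chars.lower clause.toList) || false))) = g0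
      generalize (PySem.Chars.isIn "may".toList (PySem.Chars.lower clause.toList) || (PySem.Chars.isIn "could".toList (PySem.Chars.lower clause.toList) || (PySem.Chars.isIn "potential".toList (PySem.Chars.lower clause.toList) || false))) = g1
      cases g0 <;> cases g1 <;> simp
    · have hb1 : (risk_level == "High") = false := by simp [hHigh]
      have hb2 : (risk_level == "Medium") = false := by simp [hMed]
      simp only [hb1, hb2, Bool.false_eq_true, if_false]
      simp only [List.flatMap_cons, List.flatMap_nil, List.append_nil, List.filter,
        List.any_cons, List.any_nil, List.cons_append, List.nil_append, PySem.Str.isIn_eq, PySem.Str.toList_lower]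
      have h0 : PySem.Set.contains (pvScan (["procedural", "evidence", "consideration", "not", "without", "no"] : List String) (PySem.Chars.lower clause.toList) PySem.Set.empty) "procedural" = PySem.Chars.isIn "procedural".toList (PySem.Chars.lower clause.toList) := contains_scan _ _ _ (by decide) (by decide)
      have h1 : PySem.Set.contains (pvScan (["procedural", "evidence", "consideration", "not", "without", "no"] : List String) (PySem.Chars.lower clause.toList) PySem.Set.empty) "evidence" = PySem.Chars.isIn "evidence".toList (PySem.Chars.lower clause.toList) := contains_scan _ _ _ (by decide) (by decide)
      have h2 : PySem.Set.contains (pvScan (["procedural", "evidence", "consideration", "not", "without", "no"] : List String) (PySem.Chars.lower clause.toList) PySem.Set.empty) "consideration" = PySem.Chars.isIn "consideration".toList (PySem.Chars.lower clause.toList) := contains_scan _ _ _ (by decide) (by decide)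
      have h3 : PySem.Set.contains (pvScan (["procedural", "evidence", "consideration", "not", "without", "no"] : List String) (PySem.Chars.lower clause.toList) PySem.Set.empty) "not" = PySem.Chars.isIn "not".toList (PySem.Chars.lower clause.toList) := contains_scan _ _ _ (by decide) (by decide)
      have h4 : PySem.Set.contains (pvScan (["procedural", "evidence", "consideration", "not", "without", "no"] : List String) (PySem.Chars.lower clause.toList) PySem.Set.empty) "without" = PySem.Chars.isIn "without".toList (PySem.Chars.lower clause.toList) := contains_scan _ _ _ (by decide) (by decide)
      have h5 : PySem.Set.contains (pvScan (["procedural", "evidence", "consideration", "not", "without", "no"] : List String) (PySem.Chars.lower clause.toList) PySem.Set.empty) "no" = PySem.Chars.isIn "no".toList (PySem.Chars.lower clause.toList) := contains_scan _ _ _ (by decide) (by decide)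
      rw [h0, h1, h2, h3, h4, h5]
      generalize (PySem.Chars.isIn "procedural".toList (PySem.Chars.lower clause.toList) || (PySem.Chars.isIn "evidence".toList (PySem.Chars.lower clause.toList) || (PySem.Chars.isIn "consideration".toList (PySem.Chars.lower clause.toList) || false))) = g0
      generalize (PySem.Chars.isIn "not".toList (PySem.Chars.lower clause.toList) || (PySem.Chars.isIn "without".toList (PySem.Chars.lower clause.toList) || (PySem.Chars.isIn "no".toList (PySem.Chars.lower clause.toList) || false))) = g1
      cases g0 <;> cases g1 <;> simp
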